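-- pv_equiv track=rewrite | github.com/Ineso1/Data-structure-and-algorithms-proyect | OrientadoObjetos/BinarySearchProblems/Sin_Solucionar/LongestPalindromicSubsequence.py | solve
-- ===== SOURCE A (Python) =====
-- def solve(s):
--     if len(s) == 0:
--         return 0
--     palindromo = 0
--     sList = list(s)
--     sSet = set(sList)
--     sSet = dict.fromkeys(sSet,0)
--     for i in sList:
--         if i in sSet:
--             sSet[i] += 1
--     for i in sSet:
--         if sSet[i] % 2 != 0:
--             palindromo += (sSet[i]-1)
--         else:
--             palindromo += sSet[i]
--     if palindromo == 0:
--         return 1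
--     elif len(s) % 2 != 0:
--         return palindromo + 1
--     else:
--         return palindromo
-- ===== SOURCE B (Python) =====
-- def solve(s):
--     if len(s) == 0:
--         return 0
--     t = sorted(s)
--     pairs = 0
--     i = 0
--     while i + 1 < len(t):
--         if t[i] == t[i + 1]:
--             pairs += 1
--             i += 2
--         else:
--             i += 1
--     p = 2 * pairs
--     if p == 0:
--         return 1
--     if len(s) % 2 != 0:
--         return p + 1
--     return p
-- ===== Notes on version B (the rewrite author's own statement) =====
-- stated objective: alternative
-- what changed: Replaced A's frequency-dict counting and per-key even/odd accumulation by sorting the characters and greedily pairing equal adjacent ones in one scan (p = 2 * number of pairs), keeping the same final guard logic.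
import Mathlib
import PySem

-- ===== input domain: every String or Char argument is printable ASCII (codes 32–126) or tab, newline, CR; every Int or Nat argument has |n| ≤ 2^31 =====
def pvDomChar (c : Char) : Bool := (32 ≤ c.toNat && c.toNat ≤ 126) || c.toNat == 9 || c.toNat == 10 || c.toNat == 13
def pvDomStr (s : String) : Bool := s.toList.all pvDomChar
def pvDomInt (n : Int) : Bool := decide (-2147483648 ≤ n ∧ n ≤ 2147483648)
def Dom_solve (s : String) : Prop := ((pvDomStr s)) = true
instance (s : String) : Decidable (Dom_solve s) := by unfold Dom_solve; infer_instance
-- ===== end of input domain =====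

-- B replaces A's frequency dict and per-key even/odd accumulation by sorting the characters and
-- greedily pairing equal adjacent ones in one scan (p = 2 * pairs), same final guards: alternative.
-- A's summation iterates over a dict seeded from a Python set; only its order-independent sum is modelled.

-- ===== PORT A =====
def solve (s : String) : Int :=
  if s.toList.length == 0 then 0
  else
    let sList := s.toList
    let sSet : PySem.Set Char := PySem.Set.ofList sList
    -- sSet = dict.fromkeys(sSet, 0)
    let d0 : PySem.Dict Char Int := sSet.foldl (fun d c => d.insert c 0) PySem.Dict.empty
    -- for i in sList: if i in sSet: sSet[i] += 1
    let d : PySem.Dict Char Int :=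
      sList.foldl (fun d c => if d.contains c then d.modify c 0 (· + 1) else d) d0
    -- for i in sSet: …  (sum over the dict's keys; order-independent)
    let palindromo : Int :=
      d.keys.foldl (fun p k =>
        if PySem.Int.mod (d.getD k 0) 2 ≠ 0 then p + (d.getD k 0 - 1) else p + d.getD k 0) 0
    if palindromo == 0 then 1
    else if PySem.Int.mod (s.toList.length : Int) 2 ≠ 0 then palindromo + 1
    else palindromo

-- ===== PORT B =====
-- the while loop of Source B over the sorted list: pair equal neighbours, advance by 2, else by 1
def pairCount : List Char → Int
  | [] => 0
  | [_] => 0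
  | a :: b :: t => if a == b then 1 + pairCount t else pairCount (b :: t)

def solve_alt (s : String) : Int :=
  if s.toList.length == 0 then 0
  else
    let t := PySem.List.sorted s.toList (fun c => c) false
    let p : Int := 2 * pairCount t
    if p == 0 then 1
    else if PySem.Int.mod (s.toList.length : Int) 2 ≠ 0 then p + 1
    else p

-- ===== PRECONDITION & SPEC =====
def Spec_solve (s : String) (out : Int) : Prop := out = solve_alt s
instance (s : String) (out : Int) : Decidable (Spec_solve s out) := by unfold Spec_solve; infer_instance

-- ===== CLAIM (what is proved, stated in full; the proofs are below) =====
def Claim_equal_solve : Prop := ∀ (s : String), Dom_solve s → Spec_solve s (solve s)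

-- ===== LEMMAS AND PROOFS =====

-- the fromkeys dict maps every key to 0
theorem pv_d0_getD (t : List Char) (d : PySem.Dict Char Int)
    (h : ∀ k', d.getD k' 0 = 0) (k : Char) :
    (t.foldl (fun d c => d.insert c 0) d).getD k 0 = 0 := by
  induction t generalizing d with
  | nil => exact h k
  | cons c t ih =>
      simp only [List.foldl_cons]
      exact ih _ (fun k' => by rw [PySem.Dict.getD_insert]; split <;> [rfl; exact h k'])

-- when every element of the list is already a key, the guarded loop is the plain counting loop
theorem pv_fold_if (t : List Char) (d : PySem.Dict Char Int)
    (h : ∀ c ∈ t, d.contains c = true) :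
    t.foldl (fun d c => if d.contains c then d.modify c 0 (· + 1) else d) d
      = t.foldl (fun d c => d.modify c 0 (· + 1)) d := by
  induction t generalizing d with
  | nil => rfl
  | cons c t ih =>
      simp only [List.foldl_cons, if_pos (h c (List.mem_cons_self))]
      exact ih _ (fun c' hc' => by
        rw [PySem.Dict.contains_modify]
        simp [h c' (List.mem_cons_of_mem _ hc')])

-- sum of a nodup list-map as a Finset sum
theorem pv_sum_nodup_toFinset (l : List Char) (f : Char → Int)
    (h : l.Nodup) : (l.map f).sum = ∑ k ∈ l.toFinset, f k := by
  rw [List.sum_toFinset f h]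

theorem pv_toFinset_ofList (l : List Char) :
    (PySem.Set.ofList l : List Char).toFinset = l.toFinset := by
  apply Finset.ext
  intro a
  simp [List.mem_toFinset, PySem.Set.mem_ofList]

-- pair count on a sorted list = sum of floor(count/2) over the distinct characters
theorem pv_pairCount_sorted (m : List Char) (hs : m.Pairwise (· ≤ ·)) :
    pairCount m = ∑ k ∈ m.toFinset, ((m.count k / 2 : ℕ) : ℤ) := by
  induction m using pairCount.induct with
  | case1 => simp [pairCount]
  | case2 a =>
      simp [pairCount, List.count_singleton]
  | case3 a b t heq ih =>
      -- a = b: the first two elements pair up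
      have hab : a = b := by simpa using heq
      subst hab
      have hst : t.Pairwise (· ≤ ·) := (List.pairwise_cons.mp (List.pairwise_cons.mp hs).2).2
      have hcount : ∀ k, (a :: a :: t).count k = t.count k + (if k = a then 2 else 0) := by
        intro k
        by_cases hk : k = a
        · subst hk
          simp
        · simp [hk, Ne.symm hk]
      have hfin : (a :: a :: t).toFinset = insert a t.toFinset := by
        simp [List.toFinset_cons]
      rw [pairCount, if_pos (by simp), ih hst, hfin]
      have hsplit : ∀ k, (((a :: a :: t).count k / 2 : ℕ) : ℤ)
          = ((t.count k / 2 : ℕ) : ℤ) + (if k = a then 1 else 0) := by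
        intro k
        rw [hcount k]
        by_cases hk : k = a
        · rw [if_pos hk]
          have h2 : (t.count k + 2) / 2 = t.count k / 2 + 1 := by omega
          rw [h2]; push_cast; simp [hk]
        · simp [hk]
      rw [Finset.sum_congr rfl (fun k _ => hsplit k), Finset.sum_add_distrib]
      rw [Finset.sum_ite_eq' (insert a t.toFinset) a (fun _ => (1 : ℤ))]
      rw [if_pos (Finset.mem_insert_self a t.toFinset)]
      have hins : ∑ k ∈ insert a t.toFinset, ((t.count k / 2 : ℕ) : ℤ)
          = ∑ k ∈ t.toFinset, ((t.count k / 2 : ℕ) : ℤ) := by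
        by_cases ha : a ∈ t.toFinset
        · rw [Finset.insert_eq_self.mpr ha]
        · rw [Finset.sum_insert ha]
          have : t.count a = 0 := List.count_eq_zero.mpr (by
            intro hmem; exact ha (List.mem_toFinset.mpr hmem))
          simp [this]
      rw [hins]; ring
  | case4 a b t hne ih =>
      -- a < b: a is unpaired (appears exactly once)
      have hab : a ≠ b := by simpa using hne
      have hcons := List.pairwise_cons.mp hs
      have hrest : (b :: t).Pairwise (· ≤ ·) := hcons.2
      have haleb : a ≤ b := hcons.1 b (List.mem_cons_self)
      have halt : a < b := lt_of_le_of_ne haleb hab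
      have hnotmem : a ∉ b :: t := by
        intro hmem
        rcases List.mem_cons.mp hmem with h | h
        · exact hab h
        · exact absurd ((List.pairwise_cons.mp hrest).1 a h) (not_le.mpr halt)
      rw [pairCount, if_neg (by simpa using hab), ih hrest]
      have hfin : (a :: b :: t).toFinset = insert a (b :: t).toFinset := by
        simp [List.toFinset_cons]
      rw [hfin, Finset.sum_insert (by
        intro h; exact hnotmem (List.mem_toFinset.mp h))]
      have hca : (a :: b :: t).count a = 1 := by
        rw [List.count_cons_self, List.count_eq_zero.mpr hnotmem]
      rw [hca]
      have hck : ∀ k ∈ (b :: t).toFinset,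
          (((a :: b :: t).count k / 2 : ℕ) : ℤ) = (((b :: t).count k / 2 : ℕ) : ℤ) := by
        intro k hk
        have hka : k ≠ a := by
          intro h; subst h; exact hnotmem (List.mem_toFinset.mp hk)
        rw [List.count_cons_of_ne (Ne.symm hka)]
      rw [Finset.sum_congr rfl hck]
      simp

-- both programs' accumulated value equals len(s) - Σ parity(count): the common form
theorem pv_common (l : List Char) :
    (2 : ℤ) * ∑ k ∈ l.toFinset, ((l.count k / 2 : ℕ) : ℤ)
      = (l.length : Int) - ∑ k ∈ l.toFinset, PySem.Int.mod ((l.count k : Int)) 2 := by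
  have hlen : (l.length : Int) = ∑ k ∈ l.toFinset, ((l.count k : ℕ) : ℤ) := by
    have := List.sum_toFinset_count_eq_length l
    calc (l.length : Int) = ((∑ k ∈ l.toFinset, l.count k : ℕ) : ℤ) := by rw [this]
      _ = ∑ k ∈ l.toFinset, ((l.count k : ℕ) : ℤ) := by push_cast; rfl
  rw [hlen, Finset.mul_sum, ← Finset.sum_sub_distrib]
  apply Finset.sum_congr rfl
  intro k _
  rw [PySem.Int.mod_eq_emod_of_pos (by norm_num)]
  omega

theorem pv_main (s : String) : solve s = solve_alt s := by
  unfold solve solve_alt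
  by_cases hnil : s.toList.length = 0
  · simp [hnil]
  · simp only [beq_iff_eq, hnil, if_false]
    set l := s.toList with hl
    set S : PySem.Set Char := PySem.Set.ofList l with hS
    have hd0keys : ((S.foldl (fun d c => d.insert c 0) PySem.Dict.empty) :
        PySem.Dict Char Int).keys = S := by
      rw [PySem.Dict.keys_foldl_insert S (fun _ _ => (0 : Int)) PySem.Dict.empty]
      rw [PySem.Dict.keys_empty, PySem.Set.update_nil_left, hS, PySem.Set.ofList_ofList]
    have hd0getD : ∀ k, ((S.foldl (fun d c => d.insert c 0) PySem.Dict.empty) :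
        PySem.Dict Char Int).getD k 0 = 0 :=
      pv_d0_getD S PySem.Dict.empty (fun _ => PySem.Dict.getD_empty _ _)
    have hd0contains : ∀ c ∈ l, ((S.foldl (fun d c => d.insert c 0) PySem.Dict.empty) :
        PySem.Dict Char Int).contains c = true := by
      intro c hc
      rw [PySem.Dict.contains_iff_mem_keys, hd0keys, hS, PySem.Set.mem_ofList]
      exact hc
    set d0 : PySem.Dict Char Int := S.foldl (fun d c => d.insert c 0) PySem.Dict.empty with hd0
    rw [pv_fold_if l d0 hd0contains]
    have hdkeys : (l.foldl (fun d c => d.modify c 0 (· + 1)) d0).keys = S := by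
      rw [PySem.Dict.keys_foldl_modify l (0 : Int) (fun _ _ => (· + 1)) d0,
        hd0keys, PySem.Set.update_eq_append_filter]
      have hfil : (List.filter (fun y => !S.contains y) (PySem.Set.ofList l)) = [] := by
        apply List.filter_eq_nil_iff.mpr
        intro a ha
        simp only [Bool.not_eq_true', Bool.not_eq_false, PySem.Set.contains_iff]
        exact ha
      rw [hfil, List.append_nil]
    have hdgetD : ∀ k, (l.foldl (fun d c => d.modify c 0 (· + 1)) d0).getD k 0
        = (l.count k : Int) := by
      intro k
      rw [PySem.Dict.getD_foldl_modify_add_one, hd0getD, zero_add]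
    -- A's sum = len - Σ parity
    have hpal : ((l.foldl (fun d c => d.modify c 0 (· + 1)) d0).keys.foldl (fun p k =>
        if PySem.Int.mod ((l.foldl (fun d c => d.modify c 0 (· + 1)) d0).getD k 0) 2 ≠ 0
        then p + ((l.foldl (fun d c => d.modify c 0 (· + 1)) d0).getD k 0 - 1)
        else p + (l.foldl (fun d c => d.modify c 0 (· + 1)) d0).getD k 0) 0)
        = (l.length : Int)
          - ∑ k ∈ l.toFinset, PySem.Int.mod ((l.count k : Int)) 2 := by
      have hfun : (fun (p : Int) (k : Char) =>
          if PySem.Int.mod ((l.foldl (fun d c => d.modify c 0 (· + 1)) d0).getD k 0) 2 ≠ 0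
          then p + ((l.foldl (fun d c => d.modify c 0 (· + 1)) d0).getD k 0 - 1)
          else p + (l.foldl (fun d c => d.modify c 0 (· + 1)) d0).getD k 0)
          = (fun (p : Int) (k : Char) => p +
              ((l.count k : Int) - PySem.Int.mod ((l.count k : Int)) 2)) := by
        funext p k
        rw [hdgetD k, PySem.Int.mod_eq_emod_of_pos (by norm_num : (0:ℤ) < 2)]
        split_ifs with h <;> omega
      rw [hfun, PySem.List.foldl_add, zero_add, hdkeys, hS]
      rw [pv_sum_nodup_toFinset _ _ (PySem.Set.nodup_ofList l), pv_toFinset_ofList]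
      rw [Finset.sum_sub_distrib]
      have : ∑ k ∈ l.toFinset, ((l.count k : ℕ) : ℤ) = (l.length : Int) := by
        rw [← List.sum_toFinset_count_eq_length l]; push_cast; rfl
      rw [this]
    rw [hpal]
    -- B's value = the same
    have hperm : (PySem.List.sorted l (fun c => c) false).Perm l :=
      PySem.List.sorted_perm l (fun c => c) false
    have hpc : pairCount (PySem.List.sorted l (fun c => c) false)
        = ∑ k ∈ l.toFinset, ((l.count k / 2 : ℕ) : ℤ) := by
      rw [pv_pairCount_sorted _ (PySem.List.sorted_pairwise l (fun c => c))]
      rw [List.toFinset_eq_of_perm _ _ hperm]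
      exact Finset.sum_congr rfl (fun k _ => by rw [hperm.count_eq])
    rw [hpc, pv_common]

-- ===== VERDICT (by name: the statement is the Claim_ definition above) =====
theorem solve_spec : Claim_equal_solve := by
  intro s _
  unfold Spec_solve
  exact pv_main s
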